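-- pv_equiv track=rewrite | github.com/chauhanswapnil/Coding-Challenges | CodeJam/d100000.py | d1000000
-- ===== SOURCE A (Python) =====
-- def d1000000(N, D):
--     j = 0
--     k = 0
--     for i in sorted(D):
--         if i>j:
--             k+=1
--             j+=1
--     return k
-- ===== SOURCE B (Python) =====
-- def d1000000(N, D):
--     # Walk the values in descending order, maintaining the running minimum of
--     # value+rank-1; the answer is the largest rank p with that minimum >= p
--     # (the quantity is strictly decreasing, so we may stop at the first failure).
--     ans = 0
--     p = 0
--     mn = None
--     for x in reversed(sorted(D)):
--         p += 1
--         c = x + p - 1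
--         mn = c if mn is None else min(mn, c)
--         if mn < p:
--             break
--         ans = p
--     return ans
-- ===== Notes on version B (the rewrite author's own statement) =====
-- stated objective: alternative
-- what changed: A greedily scans the sorted list ascending incrementing an accept-count; B walks the values in descending order maintaining a running minimum of value+rank-1 and returns the largest rank p with that minimum >= p, stopping early at the first failure.
import Mathlib
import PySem

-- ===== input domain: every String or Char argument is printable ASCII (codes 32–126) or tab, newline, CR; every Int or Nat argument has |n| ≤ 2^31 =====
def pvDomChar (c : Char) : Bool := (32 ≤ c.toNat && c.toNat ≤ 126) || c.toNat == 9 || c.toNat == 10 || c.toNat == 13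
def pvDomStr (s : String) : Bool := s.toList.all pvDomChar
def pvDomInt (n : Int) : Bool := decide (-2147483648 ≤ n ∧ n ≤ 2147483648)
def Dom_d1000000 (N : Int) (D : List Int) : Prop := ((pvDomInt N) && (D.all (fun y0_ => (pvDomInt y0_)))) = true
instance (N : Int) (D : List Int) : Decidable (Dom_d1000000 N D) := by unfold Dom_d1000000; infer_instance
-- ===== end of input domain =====

-- B replaces A's ascending greedy accept-count with a descending walk tracking a running minimum of value+rank-1 (alternative decomposition, same cost).

-- ===== PORT A =====
-- for i in sorted(D): if i > j: k+=1; j+=1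
def d1000000 (N : Int) (D : List Int) : Int :=
  ((PySem.List.sorted D (fun x => x) false).foldl
    (fun (jk : Int × Int) i => if jk.1 < i then (jk.1 + 1, jk.2 + 1) else jk)
    ((0 : Int), (0 : Int))).2

-- ===== PORT B =====
-- for x in reversed(sorted(D)): p += 1; c = x+p-1; mn = c if mn is None else min(mn,c); if mn < p: break; ans = p
def bLoop : List Int → Int → Option Int → Int → Int
  | [], _, _, ans => ans
  | x :: rest, p, mn, ans =>
    let p' := p + 1
    let c := x + p' - 1
    let mn' := match mn with
      | none => c
      | some m => min m c
    if mn' < p' then ans else bLoop rest p' (some mn') p'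

def d1000000_alt (N : Int) (D : List Int) : Int :=
  bLoop ((PySem.List.sorted D (fun x => x) false).reverse) 0 none 0

-- ===== PRECONDITION & SPEC =====
def Spec_d1000000 (N : Int) (D : List Int) (out : Int) : Prop := out = d1000000_alt N D
instance (N : Int) (D : List Int) (out : Int) : Decidable (Spec_d1000000 N D out) := by unfold Spec_d1000000; infer_instance

-- ===== CLAIM (what is proved, stated in full; the proofs are below) =====
def Claim_equal_d1000000 : Prop := ∀ (N : Int) (D : List Int), Dom_d1000000 N D → Spec_d1000000 N D (d1000000 N D)

-- ===== LEMMAS AND PROOFS =====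

-- A's accumulator step, with j and k fused (they are always equal).
def aStep (k i : Int) : Int := if k < i then k + 1 else k

theorem pairFold_eq (s : List Int) (j : Int) :
    s.foldl (fun (jk : Int × Int) i => if jk.1 < i then (jk.1 + 1, jk.2 + 1) else jk) (j, j)
      = (s.foldl aStep j, s.foldl aStep j) := by
  induction s generalizing j with
  | nil => rfl
  | cons x rest ih =>
    simp only [List.foldl_cons, aStep]
    split_ifs <;> simp [ih]

theorem aFold_nonneg (s : List Int) (k : Int) (hk : 0 ≤ k) : 0 ≤ s.foldl aStep k := by
  induction s generalizing k with
  | nil => exact hk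
  | cons y rest ih =>
    simp only [List.foldl_cons, aStep]
    split_ifs <;> [exact ih _ (by omega); exact ih _ hk]

theorem aFold_le (s : List Int) (k x : Int) (hall : ∀ e ∈ s, e ≤ x)
    (hk : k ≤ max x 0) : s.foldl aStep k ≤ max x 0 := by
  induction s generalizing k with
  | nil => exact hk
  | cons y rest ih =>
    have hy : y ≤ x := hall y (by simp [List.mem_cons])
    simp only [List.foldl_cons, aStep]
    split_ifs with h
    · exact ih _ (fun e he => hall e (by simp [he])) (by omega)
    · exact ih _ (fun e he => hall e (by simp [he])) hk

theorem bLoop_ge (w : List Int) (q : Int) (mn : Option Int) : q ≤ bLoop w q mn q := by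
  induction w generalizing q mn with
  | nil => exact le_refl q
  | cons x rest ih =>
    simp only [bLoop]
    split_ifs
    · exact le_refl q
    · exact le_trans (by omega) (ih (q + 1) _)

theorem bLoop_shift (w : List Int) (q a p : Int) :
    bLoop w (q + p) (some (a + p)) (q + p) = p + bLoop w q (some a) q := by
  induction w generalizing q a with
  | nil => simp [bLoop]; omega
  | cons x rest ih =>
    simp only [bLoop]
    have hmin : min (a + p) (x + (q + p + 1) - 1) = min a (x + (q + 1) - 1) + p := by omega
    have hc : (min (a + p) (x + (q + p + 1) - 1) < q + p + 1) ↔ (min a (x + (q + 1) - 1) < q + 1) := by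
      omega
    split_ifs with h1 h2 h2
    · omega
    · exact absurd (hc.mp h1) h2
    · exact absurd (hc.mpr h2) h1
    · have := ih (q + 1) (min a (x + (q + 1) - 1))
      calc bLoop rest (q + p + 1) (some (min (a + p) (x + (q + p + 1) - 1))) (q + p + 1)
          = bLoop rest (q + 1 + p) (some (min a (x + (q + 1) - 1) + p)) (q + 1 + p) := by
            rw [hmin]; ring_nf
        _ = p + bLoop rest (q + 1) (some (min a (x + (q + 1) - 1))) (q + 1) := ih (q + 1) _

theorem bLoop_big (w : List Int) (q a b : Int)
    (ha : q + (w.length : Int) ≤ a) (hb : q + (w.length : Int) ≤ b) :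
    bLoop w q (some a) q = bLoop w q (some b) q := by
  induction w generalizing q a b with
  | nil => rfl
  | cons x rest ih =>
    simp only [List.length_cons] at ha hb
    simp only [bLoop]
    have hc : (min a (x + (q + 1) - 1) < q + 1) ↔ (min b (x + (q + 1) - 1) < q + 1) := by omega
    split_ifs with h1 h2 h2
    · rfl
    · exact absurd (hc.mp h1) h2
    · exact absurd (hc.mpr h2) h1
    · by_cases hcs : x + (q + 1) - 1 < q + 1 + (rest.length : Int)
      · have : min a (x + (q + 1) - 1) = min b (x + (q + 1) - 1) := by omega
        rw [this]
      · exact ih (q + 1) _ _ (by omega) (by omega)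

theorem bLoop_none (w : List Int) (q m : Int) (hm : q + (w.length : Int) ≤ m) :
    bLoop w q (some m) q = bLoop w q none q := by
  induction w generalizing q m with
  | nil => rfl
  | cons x rest ih =>
    simp only [List.length_cons] at hm
    simp only [bLoop]
    have hc : (min m (x + (q + 1) - 1) < q + 1) ↔ (x + (q + 1) - 1 < q + 1) := by omega
    split_ifs with h1 h2 h2
    · rfl
    · exact absurd (hc.mp h1) h2
    · exact absurd (hc.mpr h2) h1
    · by_cases hcm : x + (q + 1) - 1 ≤ m
      · have : min m (x + (q + 1) - 1) = x + (q + 1) - 1 := by omega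
        rw [this]
      · have h1 : min m (x + (q + 1) - 1) = m := by omega
        rw [h1]
        calc bLoop rest (q + 1) (some m) (q + 1)
            = bLoop rest (q + 1) (some (x + (q + 1) - 1)) (q + 1) :=
              bLoop_big rest (q + 1) m _ (by omega) (by omega)
          _ = _ := rfl

theorem bLoop_mono (w : List Int) (q a b : Int) (hab : a ≤ b) :
    bLoop w q (some a) q ≤ bLoop w q (some b) q := by
  induction w generalizing q a b with
  | nil => exact le_refl q
  | cons x rest ih =>
    simp only [bLoop]
    split_ifs with h1 h2 h2
    · exact le_refl q
    · exact le_trans (by omega) (bLoop_ge rest (q + 1) _)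
    · exfalso; omega
    · exact ih (q + 1) _ _ (by omega)

theorem bLoop_min (w : List Int) (q a b : Int) :
    bLoop w q (some (min a b)) q = min (bLoop w q (some a) q) (bLoop w q (some b) q) := by
  induction w generalizing q a b with
  | nil => simp [bLoop]
  | cons x rest ih =>
    simp only [bLoop]
    have hsplit : min (min a b) (x + (q + 1) - 1)
        = min (min a (x + (q + 1) - 1)) (min b (x + (q + 1) - 1)) := by omega
    split_ifs with h1 h2 h3 h3 h3 h3
    · simp
    · have := bLoop_ge rest (q + 1) (some (min b (x + (q + 1) - 1)))
      omega
    · have := bLoop_ge rest (q + 1) (some (min a (x + (q + 1) - 1)))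
      omega
    · exfalso; omega
    · exfalso; omega
    · have := bLoop_ge rest (q + 1) (some (min b (x + (q + 1) - 1)))
      omega
    · have := bLoop_ge rest (q + 1) (some (min a (x + (q + 1) - 1)))
      omega
    · rw [hsplit]; exact ih (q + 1) _ _

theorem bLoop_cap (w : List Int) (q a : Int) (ha : q ≤ a) :
    bLoop w q (some a) q = min a (bLoop w q none q) := by
  induction w generalizing q a with
  | nil => simp [bLoop]; omega
  | cons x rest ih =>
    simp only [bLoop]
    by_cases haq : a < q + 1
    · have hbr : min a (x + (q + 1) - 1) < q + 1 := by omega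
      rw [if_pos hbr]
      split_ifs with h2
      · omega
      · have := bLoop_ge rest (q + 1) (some (x + (q + 1) - 1))
        omega
    · by_cases hcq : x + (q + 1) - 1 < q + 1
      · rw [if_pos (by omega : min a (x + (q + 1) - 1) < q + 1), if_pos hcq]
        omega
      · rw [if_neg (by omega : ¬ min a (x + (q + 1) - 1) < q + 1), if_neg hcq]
        rw [bLoop_min rest (q + 1) a (x + (q + 1) - 1), ih (q + 1) a (by omega)]
        have hle : bLoop rest (q + 1) (some (x + (q + 1) - 1)) (q + 1)
            ≤ bLoop rest (q + 1) none (q + 1) := by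
          calc bLoop rest (q + 1) (some (x + (q + 1) - 1)) (q + 1)
              ≤ bLoop rest (q + 1) (some (max (x + (q + 1) - 1) (q + 1 + (rest.length : Int)))) (q + 1) :=
                bLoop_mono rest (q + 1) _ _ (le_max_left _ _)
            _ = bLoop rest (q + 1) none (q + 1) :=
                bLoop_none rest (q + 1) _ (le_max_right _ _)
        omega

theorem bLoop_cons (x : Int) (w : List Int) :
    bLoop (x :: w) 0 none 0
      = if x ≤ 0 then 0 else 1 + min (x - 1) (bLoop w 0 none 0) := by
  simp only [bLoop]
  by_cases hx : x ≤ 0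
  · rw [if_pos (by omega : x + (0 + 1) - 1 < 0 + 1), if_pos hx]
  · rw [if_neg (by omega : ¬ x + (0 + 1) - 1 < 0 + 1), if_neg hx]
    have h1 : (0 : Int) + 1 = 0 + 1 := rfl
    have : bLoop w (0 + 1) (some ((x - 1) + 1)) (0 + 1) = 1 + bLoop w 0 (some (x - 1)) 0 :=
      bLoop_shift w 0 (x - 1) 1
    have hx2 : x + (0 + 1) - 1 = (x - 1) + 1 := by omega
    rw [show (0 : Int) + 1 = 0 + 1 from rfl]
    calc bLoop w (0 + 1) (some (x + (0 + 1) - 1)) (0 + 1)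
        = 1 + bLoop w 0 (some (x - 1)) 0 := by rw [hx2]; exact this
      _ = 1 + min (x - 1) (bLoop w 0 none 0) := by
          rw [bLoop_cap w 0 (x - 1) (by omega)]

theorem main_desc (v : List Int) (hp : v.Pairwise (fun a b => b ≤ a)) :
    v.reverse.foldl aStep 0 = bLoop v 0 none 0 := by
  induction v with
  | nil => rfl
  | cons x w ih =>
    rcases List.pairwise_cons.mp hp with ⟨hall, hw⟩
    have hk := ih hw
    have hrev_all : ∀ e ∈ w.reverse, e ≤ x := fun e he => hall e (List.mem_reverse.mp he)
    have hnn : 0 ≤ w.reverse.foldl aStep 0 := aFold_nonneg _ 0 (le_refl 0)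
    have hub : w.reverse.foldl aStep 0 ≤ max x 0 :=
      aFold_le w.reverse 0 x hrev_all (le_max_right _ _)
    rw [List.reverse_cons, List.foldl_append, bLoop_cons]
    simp only [List.foldl_cons, List.foldl_nil, aStep]
    rw [hk] at hnn hub ⊢
    split_ifs <;> omega

-- ===== VERDICT (by name: the statement is the Claim_ definition above) =====
theorem d1000000_spec : Claim_equal_d1000000 := by
  intro N D _
  unfold Spec_d1000000 d1000000 d1000000_alt
  have hpair := pairFold_eq (PySem.List.sorted D (fun x => x) false) 0
  rw [hpair]
  have hs : (PySem.List.sorted D (fun x => x) false).Pairwise (fun a b => a ≤ b) :=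
    PySem.List.sorted_pairwise D (fun x => x)
  have hrev : ((PySem.List.sorted D (fun x => x) false).reverse).Pairwise (fun a b => b ≤ a) := by
    rw [List.pairwise_reverse]; exact hs
  have := main_desc ((PySem.List.sorted D (fun x => x) false).reverse) hrev
  rw [List.reverse_reverse] at this
  exact this
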